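-- pv_equiv track=rewrite | github.com/wxy991015/LeetCode | Easy/Count Substrings with Only One Distinct Letter.py | countLetters1
-- ===== SOURCE A (Python) =====
-- def countLetters1(s: str) -> int:
--     one_distinct_letter_substr = 0
--     i, j = 0, 0
--     while i < len(s) and j < len(s):
--         while j + 1 < len(s) and s[j] == s[j+1]:
--             j += 1
--         one_distinct_letter_substr += (1+(j-i+1)) * (j-i+1) // 2
--         i = j + 1
--         j = i
--         """
--         if s[j] == s[i]:
--             j += 1
--         else:
--             count = j - i
--             one_distinct_letter_substr += (count + 1) * count // 2
--             i = j + 1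
--             j = i
--         """
--     return one_distinct_letter_substr
-- ===== SOURCE B (Python) =====
-- def countLetters1(s: str) -> int:
--     total = 0
--     cur = 0
--     prev = None
--     for ch in s:
--         cur = cur + 1 if prev is not None and ch == prev else 1
--         total += cur
--         prev = ch
--     return total
-- ===== Notes on version B (the rewrite author's own statement) =====
-- stated objective: simpler
-- what changed: Replaced the two-pointer run-scanning nested while loops with per-run triangular-number formula by a single for-loop over the characters that keeps a running run-length counter cur and adds it to the total at every character.
import Mathlib
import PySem

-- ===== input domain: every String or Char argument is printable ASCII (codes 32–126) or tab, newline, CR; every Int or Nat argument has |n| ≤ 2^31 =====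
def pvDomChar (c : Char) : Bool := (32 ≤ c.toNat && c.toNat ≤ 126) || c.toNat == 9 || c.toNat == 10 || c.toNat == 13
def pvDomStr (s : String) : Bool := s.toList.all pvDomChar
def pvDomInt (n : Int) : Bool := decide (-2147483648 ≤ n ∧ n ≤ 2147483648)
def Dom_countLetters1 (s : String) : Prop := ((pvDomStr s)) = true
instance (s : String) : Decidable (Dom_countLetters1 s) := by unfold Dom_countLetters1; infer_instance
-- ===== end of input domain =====

-- B replaces A's nested run-scanning while loops (triangular formula per run) by a
-- single pass with a running run-length counter added to the total at each character (objective: simpler).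

-- ===== PORT A =====
-- inner while loop: while j + 1 < len(s) and s[j] == s[j+1]: j += 1
-- (indices are always in range when read, so List.getD is exact here)
def advJ (cs : List Char) (j : Nat) : Nat :=
  if j + 1 < cs.length ∧ cs.getD j ' ' = cs.getD (j+1) ' ' then advJ cs (j+1) else j
termination_by cs.length - j

-- port of A's outer loop needs j ≤ advJ cs j for its termination; cited in decreasing_by
theorem advJ_ge (cs : List Char) (j : Nat) : j ≤ advJ cs j := by
  fun_induction advJ cs j with
  | case1 j h ih => omega
  | case2 j h => omega

-- outer while loop of A, state (i, j, one_distinct_letter_substr)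
def loopA (cs : List Char) (i j : Nat) (acc : Int) : Int :=
  if i < cs.length ∧ j < cs.length then
    let j' := advJ cs j
    loopA cs (j'+1) (j'+1)
      (acc + PySem.Int.floordiv ((1 + ((j' : Int) - (i : Int) + 1)) * ((j' : Int) - (i : Int) + 1)) 2)
  else acc
termination_by cs.length - j
decreasing_by have := advJ_ge cs j; omega

def countLetters1 (s : String) : Int := loopA s.toList 0 0 0

-- ===== PORT B =====
-- for ch in s: cur = cur + 1 if prev is not None and ch == prev else 1; total += cur; prev = ch
def bLoop (cs : List Char) (prev : Option Char) (cur total : Int) : Int :=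
  match cs with
  | [] => total
  | c :: t =>
      let cur' := if prev = some c then cur + 1 else 1
      bLoop t (some c) cur' (total + cur')

def countLetters1_alt (s : String) : Int := bLoop s.toList none 0 0

-- ===== PRECONDITION & SPEC =====
def Spec_countLetters1 (s : String) (out : Int) : Prop := out = countLetters1_alt s
instance (s : String) (out : Int) : Decidable (Spec_countLetters1 s out) := by unfold Spec_countLetters1; infer_instance

-- ===== CLAIM (what is proved, stated in full; the proofs are below) =====
def Claim_equal_countLetters1 : Prop := ∀ (s : String), Dom_countLetters1 s → Spec_countLetters1 s (countLetters1 s)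

-- ===== LEMMAS AND PROOFS =====

-- leading run length of character c
def rl (c : Char) : List Char → Nat
  | [] => 0
  | d :: t => if d = c then rl c t + 1 else 0

-- 1 + 2 + … + k
def sumTo : Nat → Int
  | 0 => 0
  | k+1 => sumTo k + ((k : Int) + 1)

def triQ (L : Int) : Int := PySem.Int.floordiv ((1 + L) * L) 2

-- common spec: sum over maximal runs of the triangular numbers
def specRuns : List Char → Int
  | [] => 0
  | c :: t => triQ (1 + (rl c t : Int)) + specRuns (t.drop (rl c t))
termination_by cs => cs.length
decreasing_by simp only [List.length_drop, List.length_cons]; omega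

theorem two_sumTo (k : Nat) : 2 * sumTo k = (1 + (k : Int)) * k := by
  induction k with
  | zero => simp [sumTo]
  | succ k ih => simp only [sumTo]; push_cast; push_cast at ih; linear_combination ih

theorem triQ_eq (k : Nat) : triQ (k : Int) = sumTo k := by
  unfold triQ
  rw [PySem.Int.floordiv_eq_ediv_of_pos (by omega)]
  rw [← two_sumTo k]
  exact Int.mul_ediv_cancel_left _ (by omega)

theorem advJ_eq (cs : List Char) (j : Nat) (h : j < cs.length) :
    advJ cs j = j + rl (cs.getD j ' ') (cs.drop (j+1)) := by
  fun_induction advJ cs j with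
  | case1 j hc ih =>
    have h1 : j + 1 < cs.length := hc.1
    rw [List.drop_eq_getElem_cons h1]
    rw [rl]
    have hg1 : cs.getD (j+1) ' ' = cs[j+1] := List.getD_eq_getElem cs ' ' h1
    rw [show cs[j+1] = cs.getD (j+1) ' ' from hg1.symm, ← hc.2, if_pos rfl]
    rw [ih h1]
    rw [hc.2]
    omega
  | case2 j hc =>
    by_cases h1 : j + 1 < cs.length
    · rw [List.drop_eq_getElem_cons h1, rl]
      have hg1 : cs.getD (j+1) ' ' = cs[j+1] := List.getD_eq_getElem cs ' ' h1
      have hne : cs[j+1] ≠ cs.getD j ' ' := by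
        intro he; exact hc ⟨h1, by rw [hg1, he]⟩
      rw [if_neg hne]; omega
    · rw [List.drop_eq_nil_of_le (by omega), rl]; omega

theorem rl_le (c : Char) (t : List Char) : rl c t ≤ t.length := by
  induction t with
  | nil => simp [rl]
  | cons d t ih =>
    simp only [rl]
    split
    · simp only [List.length_cons]; omega
    · simp

theorem advJ_lt (cs : List Char) (j : Nat) (h : j < cs.length) : advJ cs j < cs.length := by
  rw [advJ_eq cs j h]
  have h2 := rl_le (cs.getD j ' ') (cs.drop (j+1))
  have h3 : (cs.drop (j+1)).length = cs.length - (j+1) := List.length_drop ..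
  omega

theorem specRuns_nil : specRuns [] = 0 := by simp [specRuns]

theorem specRuns_cons (c : Char) (t : List Char) :
    specRuns (c :: t) = triQ (1 + (rl c t : Int)) + specRuns (t.drop (rl c t)) := by
  simp [specRuns]

theorem loopA_eq (cs : List Char) :
    ∀ k j acc, cs.length - j ≤ k → loopA cs j j acc = acc + specRuns (cs.drop j) := by
  intro k
  induction k with
  | zero =>
    intro j acc hk
    rw [loopA, if_neg (by omega), List.drop_eq_nil_of_le (by omega), specRuns_nil]
    omega
  | succ k ih =>
    intro j acc hk
    by_cases hj : j < cs.length
    · rw [loopA, if_pos ⟨hj, hj⟩]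
      have hadv := advJ_eq cs j hj
      have hge := advJ_ge cs j
      have hlt := advJ_lt cs j hj
      rw [ih (advJ cs j + 1) _ (by omega)]
      rw [List.drop_eq_getElem_cons hj]
      have hcg : cs[j] = cs.getD j ' ' := (List.getD_eq_getElem cs ' ' hj).symm
      rw [hcg, specRuns_cons]
      rw [List.drop_drop]
      obtain ⟨r, hr⟩ : ∃ r, rl (cs.getD j ' ') (cs.drop (j+1)) = r := ⟨_, rfl⟩
      rw [hr] at hadv ⊢
      have h1 : (1 + ((advJ cs j : Int) - (j : Int) + 1)) * ((advJ cs j : Int) - (j : Int) + 1)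
          = (1 + (1 + (r : Int))) * (1 + (r : Int)) := by
        rw [hadv]; push_cast; ring
      rw [h1]
      rw [show j + 1 + r = advJ cs j + 1 from by omega]
      unfold triQ
      ring
    · rw [loopA, if_neg (by omega), List.drop_eq_nil_of_le (by omega), specRuns_nil]
      omega

theorem rl_drop_head (c : Char) (t : List Char) :
    ∀ e, (t.drop (rl c t)).head? = some e → e ≠ c := by
  induction t with
  | nil => intro e he; simp at he
  | cons d t ih =>
    intro e he
    by_cases hd : d = c
    · rw [rl, if_pos hd] at he
      simp only [List.drop_succ_cons] at he
      exact ih e he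
    · rw [rl, if_neg hd] at he
      simp only [List.drop_zero, List.head?_cons, Option.some.injEq] at he
      rw [← he]; exact hd

theorem bRun (c : Char) : ∀ (t : List Char) (cur total : Int),
    bLoop t (some c) cur total
      = bLoop (t.drop (rl c t)) (some c) (cur + (rl c t : Int))
          (total + (rl c t : Int) * cur + sumTo (rl c t)) := by
  intro t
  induction t with
  | nil => intro cur total; simp [rl, sumTo]
  | cons d t ih =>
    intro cur total
    by_cases hd : d = c
    · subst hd
      rw [rl, if_pos rfl]
      rw [bLoop]
      rw [if_pos rfl]
      rw [ih (cur + 1) (total + (cur + 1))]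
      simp only [List.drop_succ_cons]
      congr 1
      · push_cast; ring
      · simp only [sumTo]; push_cast; ring
    · rw [rl, if_neg hd]
      simp [sumTo]

theorem bMain : ∀ (n : Nat) (cs : List Char) (prev : Option Char) (cur total : Int),
    cs.length ≤ n → (∀ c, cs.head? = some c → prev ≠ some c) →
    bLoop cs prev cur total = total + specRuns cs := by
  intro n
  induction n with
  | zero =>
    intro cs prev cur total hn _
    have : cs = [] := List.eq_nil_of_length_eq_zero (by omega)
    subst this; simp [bLoop, specRuns_nil]
  | succ n ih =>
    intro cs prev cur total hn hfresh
    match cs with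
    | [] => simp [bLoop, specRuns_nil]
    | c :: t =>
      have hne : prev ≠ some c := hfresh c (by simp)
      rw [bLoop]
      simp only [if_neg hne]
      rw [bRun c t 1 (total + 1)]
      rw [ih (t.drop (rl c t)) (some c) _ _
            (by simp [List.length_drop] at hn ⊢; omega)
            (by intro e he hee
                exact rl_drop_head c t e he (by injection hee with h; exact h.symm))]
      rw [specRuns_cons]
      have : triQ (1 + (rl c t : Int)) = sumTo (rl c t) + ((rl c t : Int) + 1) := by
        have := triQ_eq (rl c t + 1)
        push_cast at this
        rw [show (1 : Int) + (rl c t : Int) = (rl c t : Int) + 1 by ring, this]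
        simp [sumTo]
      rw [this]
      ring

-- ===== VERDICT (by name: the statement is the Claim_ definition above) =====
theorem countLetters1_spec : Claim_equal_countLetters1 := by
  intro s _
  unfold Spec_countLetters1 countLetters1 countLetters1_alt
  rw [loopA_eq s.toList s.toList.length 0 0 (by omega)]
  rw [bMain s.toList.length s.toList none 0 0 (le_refl _) (by intro c _ h; cases h)]
  simp
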